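-- pv_equiv track=rewrite | github.com/cyhhao/vibe-remote | config/v2_sessions.py | infer_platform_from_thread_ids
-- ===== SOURCE A (Python) =====
-- from typing import Any, Dict, List, Optional
--
-- def infer_platform_from_thread_ids(agent_maps: Dict[str, Dict[str, str]]) -> Optional[str]:
--     """Infer platform from thread ID prefixes within a legacy mapping."""
--     platforms: set[str] = set()
--     for thread_map in agent_maps.values():
--         for thread_id in thread_map:
--             if "_" in thread_id:
--                 prefix = thread_id.split("_", 1)[0]
--                 if prefix.isalpha():
--                     platforms.add(prefix)
--     if len(platforms) == 1:
--         return platforms.pop()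
--     return None
-- ===== SOURCE B (Python) =====
-- from typing import Any, Dict, List, Optional
--
-- def infer_platform_from_thread_ids(agent_maps: Dict[str, Dict[str, str]]) -> Optional[str]:
--     """Infer platform from thread ID prefixes within a legacy mapping."""
--     candidate: Optional[str] = None
--     for thread_map in agent_maps.values():
--         for thread_id in thread_map:
--             if "_" not in thread_id:
--                 continue
--             prefix = thread_id.split("_", 1)[0]
--             if not prefix.isalpha():
--                 continue
--             if candidate is None:
--                 candidate = prefix
--             elif candidate != prefix:
--                 return None
--     return candidate
-- ===== Notes on version B (the rewrite author's own statement) =====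
-- stated objective: simpler
-- what changed: Replaces the accumulated set of all prefixes (counted at the end) by a single scalar candidate with an early return on the first conflicting prefix.
import Mathlib
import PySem

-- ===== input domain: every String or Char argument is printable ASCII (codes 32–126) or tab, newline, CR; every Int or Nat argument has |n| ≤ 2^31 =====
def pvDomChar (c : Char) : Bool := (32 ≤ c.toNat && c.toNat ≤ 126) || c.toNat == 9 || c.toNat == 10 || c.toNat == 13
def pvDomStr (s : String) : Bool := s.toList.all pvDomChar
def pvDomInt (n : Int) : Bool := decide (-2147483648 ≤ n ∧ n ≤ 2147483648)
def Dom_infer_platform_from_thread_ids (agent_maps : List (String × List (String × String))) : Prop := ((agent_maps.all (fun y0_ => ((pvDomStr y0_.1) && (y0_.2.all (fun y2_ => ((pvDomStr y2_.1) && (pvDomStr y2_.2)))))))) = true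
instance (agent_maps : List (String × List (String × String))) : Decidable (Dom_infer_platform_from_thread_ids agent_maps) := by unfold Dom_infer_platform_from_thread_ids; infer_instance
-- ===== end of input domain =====

-- B replaces A's accumulated set of prefixes by a single scalar candidate with an
-- early return on the first conflicting prefix (objective: simpler).

-- ===== PORT A =====
-- shared guard of both Pythons: 'if "_" in thread_id: prefix = thread_id.split("_", 1)[0]; if prefix.isalpha(): …'
def pvGuardPrefix? (thread_id : String) : Option String :=
  if PySem.Str.isIn "_" thread_id then
    match PySem.Str.splitMax? thread_id "_" 1 with
    | some (p :: _) => if PySem.Str.strIsalpha p then some p else none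
    | _ => none
  else none

def infer_platform_from_thread_ids (agent_maps : List (String × List (String × String))) : Option String :=
  let platforms : PySem.Set String :=
    agent_maps.foldl (fun s m =>
      m.2.foldl (fun s e =>
        match pvGuardPrefix? e.1 with
        | some p => PySem.Set.add s p
        | none => s) s) PySem.Set.empty
  if PySem.Set.len platforms == 1 then platforms.head? else none

-- ===== PORT B =====
-- inner loop over one thread_map; 'none' = the Python early 'return None'
def pvAltInner : List (String × String) → Option String → Option (Option String)
  | [], cand => some cand
  | e :: rest, cand =>
    match pvGuardPrefix? e.1 with
    | none => pvAltInner rest cand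
    | some p =>
      match cand with
      | none => pvAltInner rest (some p)
      | some c => if c = p then pvAltInner rest cand else none

def pvAltOuter : List (String × List (String × String)) → Option String → Option String
  | [], cand => cand
  | m :: rest, cand =>
    match pvAltInner m.2 cand with
    | none => none
    | some cand' => pvAltOuter rest cand'

def infer_platform_from_thread_ids_alt (agent_maps : List (String × List (String × String))) : Option String :=
  pvAltOuter agent_maps none

-- ===== PRECONDITION & SPEC =====
def Spec_infer_platform_from_thread_ids (agent_maps : List (String × List (String × String))) (out : Option String) : Prop := out = infer_platform_from_thread_ids_alt agent_maps
instance (agent_maps : List (String × List (String × String))) (out : Option String) : Decidable (Spec_infer_platform_from_thread_ids agent_maps out) := by unfold Spec_infer_platform_from_thread_ids; infer_instance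

-- ===== CLAIM (what is proved, stated in full; the proofs are below) =====
def Claim_equal_infer_platform_from_thread_ids : Prop := ∀ (agent_maps : List (String × List (String × String))), Dom_infer_platform_from_thread_ids agent_maps → Spec_infer_platform_from_thread_ids agent_maps (infer_platform_from_thread_ids agent_maps)

-- ===== LEMMAS AND PROOFS =====

-- the stream of valid prefixes contributed by one map entry
def pvPiece (m : String × List (String × String)) : List String :=
  m.2.filterMap (fun e => pvGuardPrefix? e.1)

-- proof-side view of B's inner loop on the filtered prefix stream
def pvScan : List String → Option String → Option (Option String)
  | [], c => some c
  | p :: ps, c =>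
    match c with
    | none => pvScan ps (some p)
    | some q => if q = p then pvScan ps c else none

theorem pvFoldl_filterMap :
    ∀ (xs : List (String × String)) (init : PySem.Set String),
      xs.foldl (fun s e =>
        match pvGuardPrefix? e.1 with
        | some p => PySem.Set.add s p
        | none => s) init
        = (xs.filterMap (fun e => pvGuardPrefix? e.1)).foldl PySem.Set.add init := by
  intro xs
  induction xs with
  | nil => intro init; rfl
  | cons x xs ih =>
    intro init
    simp only [List.foldl_cons, List.filterMap_cons]
    cases pvGuardPrefix? x.1 <;> simp [ih]

theorem pvA_set_eq : ∀ (L : List (String × List (String × String))) (s : PySem.Set String),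
    L.foldl (fun s m =>
      m.2.foldl (fun s e =>
        match pvGuardPrefix? e.1 with
        | some p => PySem.Set.add s p
        | none => s) s) s
      = (L.flatMap pvPiece).foldl PySem.Set.add s := by
  intro L
  induction L with
  | nil => intro s; rfl
  | cons m rest ih =>
    intro s
    simp only [List.foldl_cons, List.flatMap_cons, List.foldl_append]
    rw [ih, pvFoldl_filterMap]
    rfl

theorem pvScan_append (xs ys : List String) : ∀ (c : Option String),
    pvScan (xs ++ ys) c = (pvScan xs c).bind (fun c' => pvScan ys c') := by
  induction xs with
  | nil => intro c; rfl
  | cons p ps ih =>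
    intro c
    cases c with
    | none => simpa [pvScan] using ih (some p)
    | some q =>
      by_cases h : q = p <;> simp [pvScan, h, ih]

theorem pvAltInner_eq (m : List (String × String)) : ∀ (c : Option String),
    pvAltInner m c = pvScan (m.filterMap (fun e => pvGuardPrefix? e.1)) c := by
  induction m with
  | nil => intro c; rfl
  | cons e rest ih =>
    intro c
    simp only [pvAltInner, List.filterMap_cons]
    cases hg : pvGuardPrefix? e.1 with
    | none => exact ih c
    | some p =>
      cases c with
      | none => exact ih (some p)
      | some q =>
        by_cases h : q = p <;> simp [pvScan, h, ih]

theorem pvAltOuter_eq : ∀ (L : List (String × List (String × String))) (c : Option String),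
    pvAltOuter L c = (pvScan (L.flatMap pvPiece) c).join := by
  intro L
  induction L with
  | nil => intro c; rfl
  | cons m rest ih =>
    intro c
    simp only [pvAltOuter, List.flatMap_cons, pvScan_append, pvAltInner_eq, pvPiece]
    cases pvScan (m.2.filterMap (fun e => pvGuardPrefix? e.1)) c with
    | none => rfl
    | some c' => simpa using ih c'

theorem pvScan_some (p : String) : ∀ (ps : List String),
    pvScan ps (some p) = if ∀ x ∈ ps, x = p then some (some p) else none := by
  intro ps
  induction ps with
  | nil => simp [pvScan]
  | cons q qs ih =>
    by_cases h : p = q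
    · subst h
      have hstep : pvScan (p :: qs) (some p) = pvScan qs (some p) := by simp [pvScan]
      rw [hstep, ih]
      by_cases hall : ∀ x ∈ qs, x = p
      · rw [if_pos hall, if_pos (by simpa [List.forall_mem_cons] using hall)]
      · rw [if_neg hall, if_neg (fun hh => hall (fun x hx => hh x (List.mem_cons_of_mem _ hx)))]
    · have h1 : pvScan (q :: qs) (some p) = none := by simp [pvScan, h]
      rw [h1, if_neg (fun hh => h ((hh q (by simp)).symm))]

theorem pvOfList_all_eq (p : String) : ∀ (ps : List String), (∀ x ∈ ps, x = p) →
    ps.foldl PySem.Set.add [p] = [p] := by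
  intro ps
  induction ps with
  | nil => intro _; rfl
  | cons q qs ih =>
    intro h
    have hq : q = p := h q (by simp)
    subst hq
    have hstep : PySem.Set.add [q] q = [q] := by
      simp [PySem.Set.add]
    simp only [List.foldl_cons, hstep]
    exact ih (fun x hx => h x (by simp [hx]))

theorem pvMain (P : List String) :
    (if PySem.Set.len (P.foldl PySem.Set.add PySem.Set.empty) == 1
       then (P.foldl PySem.Set.add PySem.Set.empty).head? else none)
      = (pvScan P none).join := by
  cases P with
  | nil => rfl
  | cons p ps =>
    have hs : pvScan (p :: ps) none = pvScan ps (some p) := by simp [pvScan]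
    have hcons : (p :: ps).foldl PySem.Set.add PySem.Set.empty
        = ps.foldl PySem.Set.add [p] := by
      have hstep : PySem.Set.add PySem.Set.empty p = [p] := by
        simp [PySem.Set.add, PySem.Set.empty]
      rw [List.foldl_cons, hstep]
    by_cases hall : ∀ x ∈ ps, x = p
    · have h1 : ps.foldl PySem.Set.add [p] = [p] := pvOfList_all_eq p ps hall
      rw [hs, pvScan_some, if_pos hall, hcons, h1]
      simp [PySem.Set.len]
    · have hscan : pvScan ps (some p) = none := by
        rw [pvScan_some, if_neg hall]
      have hne : ¬ (PySem.Set.len ((p :: ps).foldl PySem.Set.add PySem.Set.empty) == 1) = true := by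
        have hfold : (p :: ps).foldl PySem.Set.add PySem.Set.empty = PySem.Set.ofList (p :: ps) := by
          rw [PySem.Set.ofList_eq_foldl]; rfl
        rw [hfold]
        intro hone
        have hone' : (PySem.Set.ofList (p :: ps)).length = 1 := by
          simpa [PySem.Set.len] using hone
        obtain ⟨a, ha⟩ := List.length_eq_one_iff.mp hone'
        rcases not_forall.mp hall with ⟨q, hq⟩
        rcases Classical.em (q ∈ ps) with hmem | hmem
        · have hqp : q ≠ p := fun he => hq (fun _ => he)
          have hp : p ∈ PySem.Set.ofList (p :: ps) := (PySem.Set.mem_ofList _ _).mpr (by simp)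
          have hqm : q ∈ PySem.Set.ofList (p :: ps) := (PySem.Set.mem_ofList _ _).mpr (by simp [hmem])
          rw [ha] at hp hqm
          simp at hp hqm
          exact hqp (hqm.trans hp.symm)
        · exact hq (fun hm => absurd hm hmem)
      rw [hs, hscan, if_neg hne]
      rfl

-- ===== VERDICT (by name: the statement is the Claim_ definition above) =====
theorem infer_platform_from_thread_ids_spec : Claim_equal_infer_platform_from_thread_ids := by
  intro agent_maps _
  show infer_platform_from_thread_ids agent_maps = infer_platform_from_thread_ids_alt agent_maps
  simp only [infer_platform_from_thread_ids, infer_platform_from_thread_ids_alt]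
  rw [pvA_set_eq, pvAltOuter_eq]
  exact pvMain (agent_maps.flatMap pvPiece)
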